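-- pv_equiv track=rewrite | github.com/turium-ai/spiritsage | scripts/enrichRegions.py | derive_country_from_type
-- ===== SOURCE A (Python) =====
-- def derive_country_from_type(liquor_type):
--     t = (liquor_type or '').lower()
--     if 'scotch' in t or 'single malt' in t:
--         return 'Scotland'
--     if 'irish' in t:
--         return 'Ireland'
--     if 'japanese' in t:
--         return 'Japan'
--     if 'canadian' in t:
--         return 'Canada'
--     if any(x in t for x in ['bourbon', 'tennessee', 'rye', 'american', 'moonshine', 'corn whiskey']):
--         return 'USA'
--     return ''
-- ===== SOURCE B (Python) =====
-- # Different algorithm: instead of cascaded substring-membership tests, scan every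
-- # position of the lowered text once, try to match each keyword at that position,
-- # and keep the minimum-priority country matched anywhere.
-- KEYWORD_PRIORITY = {
--     'scotch': 0, 'single malt': 0,
--     'irish': 1,
--     'japanese': 2,
--     'canadian': 3,
--     'bourbon': 4, 'tennessee': 4, 'rye': 4, 'american': 4, 'moonshine': 4,
--     'corn whiskey': 4,
-- }
-- COUNTRIES = ['Scotland', 'Ireland', 'Japan', 'Canada', 'USA', '']
--
--
-- def derive_country_from_type(liquor_type):
--     t = (liquor_type or '').lower()
--     best = 5
--     for i in range(len(t)):
--         for kw, p in KEYWORD_PRIORITY.items():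
--             if p < best and t.startswith(kw, i):
--                 best = p
--     return COUNTRIES[best]
-- ===== Notes on version B (the rewrite author's own statement) =====
-- stated objective: alternative
-- what changed: A runs cascaded whole-string substring-membership tests per country; B makes a single positional scan of the lowered text, matching every keyword at each index and keeping the minimum-priority country matched anywhere, then indexes a country table with that minimum.
import Mathlib
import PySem

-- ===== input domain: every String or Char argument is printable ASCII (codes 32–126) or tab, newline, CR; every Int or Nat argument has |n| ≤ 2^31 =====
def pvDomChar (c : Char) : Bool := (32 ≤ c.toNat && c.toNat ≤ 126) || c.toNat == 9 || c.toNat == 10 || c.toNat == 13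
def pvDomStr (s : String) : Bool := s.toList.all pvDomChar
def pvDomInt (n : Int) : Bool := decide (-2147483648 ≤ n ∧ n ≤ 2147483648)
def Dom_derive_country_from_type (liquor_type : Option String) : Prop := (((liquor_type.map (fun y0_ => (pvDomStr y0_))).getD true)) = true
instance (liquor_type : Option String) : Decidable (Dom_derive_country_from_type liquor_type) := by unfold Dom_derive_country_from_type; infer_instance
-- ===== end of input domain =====

-- B replaces A's cascaded substring-membership tests by a single positional scan keeping
-- the minimum-priority keyword match, then indexes a country table (alternative; same cost).

-- ===== PORT A =====
def derive_country_from_type (liquor_type : Option String) : String :=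
  let t := PySem.Str.lower (liquor_type.getD "")
  if PySem.Str.isIn "scotch" t || PySem.Str.isIn "single malt" t then "Scotland"
  else if PySem.Str.isIn "irish" t then "Ireland"
  else if PySem.Str.isIn "japanese" t then "Japan"
  else if PySem.Str.isIn "canadian" t then "Canada"
  else if (["bourbon", "tennessee", "rye", "american", "moonshine", "corn whiskey"].any
      (fun x => PySem.Str.isIn x t)) then "USA"
  else ""

-- ===== PORT B =====
def pvKeywordPriority : List (List Char × Nat) :=
  [ ("scotch".toList, 0), ("single malt".toList, 0)
  , ("irish".toList, 1)
  , ("japanese".toList, 2)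
  , ("canadian".toList, 3)
  , ("bourbon".toList, 4), ("tennessee".toList, 4), ("rye".toList, 4)
  , ("american".toList, 4), ("moonshine".toList, 4), ("corn whiskey".toList, 4) ]

def pvCountries : List String := ["Scotland", "Ireland", "Japan", "Canada", "USA", ""]

-- t.startswith(kw, i) with 0 ≤ i: kw is a prefix of t from position i (exact for i ≥ 0)
def derive_country_from_type_alt (liquor_type : Option String) : String :=
  let t := PySem.Chars.lower (liquor_type.getD "").toList
  let best := (List.range t.length).foldl (fun best i =>
    pvKeywordPriority.foldl (fun best kw =>
      if kw.2 < best && PySem.Chars.startswith (t.drop i) kw.1 then kw.2 else best) best) 5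
  pvCountries.getD best ""

-- ===== PRECONDITION & SPEC =====
def Spec_derive_country_from_type (liquor_type : Option String) (out : String) : Prop := out = derive_country_from_type_alt liquor_type
instance (liquor_type : Option String) (out : String) : Decidable (Spec_derive_country_from_type liquor_type out) := by unfold Spec_derive_country_from_type; infer_instance

-- ===== CLAIM (what is proved, stated in full; the proofs are below) =====
def Claim_equal_derive_country_from_type : Prop := ∀ (liquor_type : Option String), Dom_derive_country_from_type liquor_type → Spec_derive_country_from_type liquor_type (derive_country_from_type liquor_type)

-- ===== LEMMAS AND PROOFS =====

-- B's update step 'if f x < b && p x then f x else b' is a conditional running minimum.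
lemma step_eq_min (q : α → Bool) (f : α → Nat) (b : Nat) (x : α) :
    (if f x < b && q x then f x else b) = (if q x then min b (f x) else b) := by
  by_cases h : q x
  · simp only [h, Bool.and_true, decide_eq_true_eq, Nat.min_def]; split_ifs <;> omega
  · simp [h]

-- fold of a conditional min: the result is the seed or the value of a passing element
lemma foldl_min_if_mem (q : α → Bool) (f : α → Nat) :
    ∀ (l : List α) (b : Nat),
      (l.foldl (fun b x => if q x then min b (f x) else b) b = b) ∨
      ∃ x ∈ l, q x = true ∧ l.foldl (fun b x => if q x then min b (f x) else b) b = f x := by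
  intro l
  induction l with
  | nil => intro b; exact Or.inl rfl
  | cons a l ih =>
    intro b
    simp only [List.foldl_cons]
    by_cases hq : q a
    · rcases ih (min b (f a)) with h | ⟨x, hx, hqx, hfx⟩
      · rcases Nat.le_total b (f a) with hle | hle
        · rw [Nat.min_eq_left hle] at h
          left; simpa [hq, Nat.min_eq_left hle] using h
        · rw [Nat.min_eq_right hle] at h
          right
          exact ⟨a, List.mem_cons_self, hq, by simpa [hq, Nat.min_eq_right hle] using h⟩
      · right; exact ⟨x, List.mem_cons_of_mem _ hx, hqx, by simpa [hq] using hfx⟩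
    · rcases ih b with h | ⟨x, hx, hqx, hfx⟩
      · left; simpa [hq] using h
      · right; exact ⟨x, List.mem_cons_of_mem _ hx, hqx, by simpa [hq] using hfx⟩

-- fold of a conditional min is bounded by the seed and by the value of every passing element
lemma foldl_min_if_le (q : α → Bool) (f : α → Nat) :
    ∀ (l : List α) (b : Nat),
      l.foldl (fun b x => if q x then min b (f x) else b) b ≤ b ∧
      ∀ x ∈ l, q x = true → l.foldl (fun b x => if q x then min b (f x) else b) b ≤ f x := by
  intro l
  induction l with
  | nil => intro b; exact ⟨le_refl b, by simp⟩
  | cons a l ih =>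
    intro b
    simp only [List.foldl_cons]
    constructor
    · refine le_trans (ih _).1 ?_
      by_cases hq : q a <;> simp [hq]
    · intro x hx hqx
      rcases List.mem_cons.mp hx with rfl | hx
      · refine le_trans (ih _).1 ?_
        simp [hqx]
      · exact (ih _).2 x hx hqx

-- the flat list of (position, keyword-entry) pairs B's double loop visits
def pvPairs (t : List Char) : List (Nat × (List Char × Nat)) :=
  (List.range t.length).flatMap (fun i => pvKeywordPriority.map (fun kw => (i, kw)))

-- B's double fold, as a single conditional-min fold over pvPairs
lemma alt_fold_eq (t : List Char) :
    (List.range t.length).foldl (fun best i =>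
      pvKeywordPriority.foldl (fun best kw =>
        if kw.2 < best && PySem.Chars.startswith (t.drop i) kw.1 then kw.2 else best) best) 5
    = (pvPairs t).foldl
        (fun b p => if PySem.Chars.startswith (t.drop p.1) p.2.1 then min b p.2.2 else b) 5 := by
  rw [pvPairs, List.foldl_flatMap]
  refine PySem.List.foldl_congr_mem _ _ _ _ (fun b i _ => ?_)
  rw [List.foldl_map]
  exact PySem.List.foldl_congr_mem _ _ _ _ (fun acc kw _ =>
    step_eq_min (fun kw : List Char × Nat => PySem.Chars.startswith (List.drop i t) kw.1)
      (fun kw => kw.2) acc kw)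

-- a keyword matches at some scanned position iff it is a substring of t
lemma mem_pairs_match_iff (t : List Char) (kw : List Char × Nat) (hkw : kw ∈ pvKeywordPriority) :
    (∃ i, (i, kw) ∈ pvPairs t ∧ PySem.Chars.startswith (t.drop i) kw.1 = true) ↔
      PySem.Chars.isIn kw.1 t = true := by
  have hne : kw.1 ≠ [] := by
    fin_cases hkw <;> simp
  constructor
  · rintro ⟨i, -, hst⟩
    exact (PySem.Chars.exists_prefix_drop_iff_isIn kw.1 t).mp
      ⟨i, (PySem.Chars.startswith_iff _ _).mp hst⟩
  · intro hin
    obtain ⟨j, hj⟩ := (PySem.Chars.exists_prefix_drop_iff_isIn kw.1 t).mpr hin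
    have hjlt : j < t.length := by
      by_contra h
      have : t.drop j = [] := List.drop_eq_nil_of_le (by omega)
      rw [this] at hj
      exact hne (List.prefix_nil.mp hj)
    refine ⟨j, ?_, (PySem.Chars.startswith_iff _ _).mpr hj⟩
    simp only [pvPairs, List.mem_flatMap]
    exact ⟨j, List.mem_range.mpr hjlt, List.mem_map.mpr ⟨kw, hkw, rfl⟩⟩

theorem derive_country_from_type_spec : Claim_equal_derive_country_from_type := by
  intro lt _
  unfold Spec_derive_country_from_type derive_country_from_type derive_country_from_type_alt
  simp only [PySem.Str.isIn_eq, PySem.Str.toList_lower]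
  set t : List Char := PySem.Chars.lower (lt.getD "").toList with ht
  rw [alt_fold_eq t]
  set q : Nat × (List Char × Nat) → Bool := fun p => PySem.Chars.startswith (t.drop p.1) p.2.1 with hq
  set best : Nat := (pvPairs t).foldl (fun b p => if q p then min b p.2.2 else b) 5 with hbest
  -- lower bound: best ≤ priority of every keyword occurring in t
  have hub : ∀ kw ∈ pvKeywordPriority, PySem.Chars.isIn kw.1 t = true → best ≤ kw.2 := by
    intro kw hkw hin
    obtain ⟨i, hip, hst⟩ := (mem_pairs_match_iff t kw hkw).mpr hin
    exact (foldl_min_if_le q (fun p => p.2.2) (pvPairs t) 5).2 (i, kw) hip hst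
  -- best is 5 or the priority of some keyword occurring in t
  have hlb : best = 5 ∨ ∃ kw ∈ pvKeywordPriority, PySem.Chars.isIn kw.1 t = true ∧ best = kw.2 := by
    rcases foldl_min_if_mem q (fun p => p.2.2) (pvPairs t) 5 with h | ⟨p, hp, hqp, hfp⟩
    · exact Or.inl h
    · right
      have hkw : p.2 ∈ pvKeywordPriority := by
        simp only [pvPairs, List.mem_flatMap, List.mem_map] at hp
        obtain ⟨i, -, kw, hkw, hpe⟩ := hp
        simpa [← hpe] using hkw
      exact ⟨p.2, hkw, (mem_pairs_match_iff t p.2 hkw).mp ⟨p.1, by simpa using hp, hqp⟩, hfp⟩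
  clear_value t q best
  clear ht hq hbest
  split_ifs with g1 g2 g3 g4 g5
  · -- Scotland
    rcases (by simpa using g1 :
        PySem.Chars.isIn "scotch".toList t = true ∨
          PySem.Chars.isIn "single malt".toList t = true) with h | h
    · have hb : best = 0 := Nat.le_zero.mp (hub ("scotch".toList, 0) (by simp [pvKeywordPriority]) h)
      rw [hb]; rfl
    · have hb : best = 0 :=
        Nat.le_zero.mp (hub ("single malt".toList, 0) (by simp [pvKeywordPriority]) h)
      rw [hb]; rfl
  · -- Ireland
    have hle : best ≤ 1 := hub ("irish".toList, 1) (by simp [pvKeywordPriority]) g2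
    have hb : best = 1 := by
      rcases hlb with h | ⟨kw, hkw, hin, hbe⟩
      · omega
      · fin_cases hkw <;> simp_all
    rw [hb]; rfl
  · -- Japan
    have hle : best ≤ 2 := hub ("japanese".toList, 2) (by simp [pvKeywordPriority]) g3
    have hb : best = 2 := by
      rcases hlb with h | ⟨kw, hkw, hin, hbe⟩
      · omega
      · fin_cases hkw <;> simp_all
    rw [hb]; rfl
  · -- Canada
    have hle : best ≤ 3 := hub ("canadian".toList, 3) (by simp [pvKeywordPriority]) g4
    have hb : best = 3 := by
      rcases hlb with h | ⟨kw, hkw, hin, hbe⟩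
      · omega
      · fin_cases hkw <;> simp_all
    rw [hb]; rfl
  · -- USA
    obtain ⟨x, hx, hin⟩ := List.any_eq_true.mp g5
    have hle : best ≤ 4 := by
      fin_cases hx <;> exact hub (_, 4) (by decide) hin
    have hb : best = 4 := by
      rcases hlb with h | ⟨kw, hkw, hin', hbe⟩
      · omega
      · fin_cases hkw <;> simp_all
    rw [hb]; rfl
  · -- no match
    have hb : best = 5 := by
      rcases hlb with h | ⟨kw, hkw, hin, hbe⟩
      · exact h
      · exfalso; fin_cases hkw <;> simp_all
    rw [hb]; rfl
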